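-- pv_equiv track=rewrite | github.com/Anishpuj/Topic-modelling-V2 | enhanced_topic_modeling_llm.py | generate_rule_based_description
-- ===== SOURCE A (Python) =====
-- def generate_rule_based_description(top_words, topic_idx):
--     """Fallback rule-based description generation"""
--     # Simple rule-based topic naming
--     word_themes = {
--         'quality': ['quality', 'good', 'excellent', 'perfect', 'great'],
--         'delivery': ['delivery', 'shipping', 'fast', 'quick', 'time'],
--         'price': ['price', 'cheap', 'expensive', 'value', 'money', 'cost'],
--         'design': ['design', 'look', 'beautiful', 'color', 'style'],
--         'service': ['service', 'support', 'help', 'staff', 'customer'],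
--         'product': ['product', 'item', 'package', 'box', 'received']
--     }
--
--     theme_scores = {}
--     for theme, theme_words in word_themes.items():
--         score = sum(1 for word in top_words if word in theme_words)
--         theme_scores[theme] = score
--
--     main_theme = max(theme_scores, key=theme_scores.get)
--
--     return {
--         'name': f'{main_theme.title()} Discussion',
--         'description': f'Reviews discussing {main_theme} aspects of the product',
--         'sentiment_theme': 'Mixed'
--     }
-- ===== SOURCE B (Python) =====
-- _WORD_THEMES = {
--     'quality': ['quality', 'good', 'excellent', 'perfect', 'great'],
--     'delivery': ['delivery', 'shipping', 'fast', 'quick', 'time'],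
--     'price': ['price', 'cheap', 'expensive', 'value', 'money', 'cost'],
--     'design': ['design', 'look', 'beautiful', 'color', 'style'],
--     'service': ['service', 'support', 'help', 'staff', 'customer'],
--     'product': ['product', 'item', 'package', 'box', 'received'],
-- }
-- # the theme word lists are pairwise disjoint, so each word maps to exactly one theme
-- _WORD_TO_THEME = {w: t for t, ws in _WORD_THEMES.items() for w in ws}
--
--
-- def generate_rule_based_description(top_words, topic_idx):
--     """Fallback rule-based description generation (single pass over top_words)"""
--     theme_scores = dict.fromkeys(_WORD_THEMES, 0)
--     for word in top_words:
--         theme = _WORD_TO_THEME.get(word)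
--         if theme is not None:
--             theme_scores[theme] += 1
--
--     main_theme = max(theme_scores, key=theme_scores.get)
--
--     return {
--         'name': f'{main_theme.title()} Discussion',
--         'description': f'Reviews discussing {main_theme} aspects of the product',
--         'sentiment_theme': 'Mixed',
--     }
-- ===== Notes on version B (the rewrite author's own statement) =====
-- stated objective: faster
-- what changed: A scans top_words once per theme (six passes, each with an inner membership scan); B precomputes a word-to-theme dictionary from the pairwise-disjoint theme lists and tallies all scores in a single pass over top_words, keeping the same score-dict insertion order and first-maximum tie-breaking.
import Mathlib
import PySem

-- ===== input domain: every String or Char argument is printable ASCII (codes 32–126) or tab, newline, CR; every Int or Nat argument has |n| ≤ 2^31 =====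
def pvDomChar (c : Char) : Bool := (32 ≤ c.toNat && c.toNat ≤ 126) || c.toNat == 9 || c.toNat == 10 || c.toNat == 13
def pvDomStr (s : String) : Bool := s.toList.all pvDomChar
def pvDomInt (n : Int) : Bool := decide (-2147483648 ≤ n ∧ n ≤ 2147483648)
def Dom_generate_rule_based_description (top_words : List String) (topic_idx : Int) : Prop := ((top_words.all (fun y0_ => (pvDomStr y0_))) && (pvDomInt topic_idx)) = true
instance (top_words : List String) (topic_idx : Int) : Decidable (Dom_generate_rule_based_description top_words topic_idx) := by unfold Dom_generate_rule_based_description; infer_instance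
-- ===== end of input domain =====

-- B replaces A's six scans of top_words (one per theme) by a single pass with a
-- precomputed word→theme dictionary (the theme word lists are pairwise disjoint);
-- same scores, same first-maximum tie-breaking, same returned dict.

-- str.title(): exact on the ASCII domain (uppercase a letter after a non-letter, lowercase otherwise)
def pvTitleChars : List Char → Bool → List Char
  | [], _ => []
  | c :: rest, prevAlpha =>
    (if prevAlpha then c.toLower else c.toUpper) :: pvTitleChars rest c.isAlpha

def pvTitle (s : String) : String := String.ofList (pvTitleChars s.toList false)

-- ===== PORT A =====
def pvWordThemes : List (String × List String) :=
  [("quality", ["quality", "good", "excellent", "perfect", "great"]),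
   ("delivery", ["delivery", "shipping", "fast", "quick", "time"]),
   ("price", ["price", "cheap", "expensive", "value", "money", "cost"]),
   ("design", ["design", "look", "beautiful", "color", "style"]),
   ("service", ["service", "support", "help", "staff", "customer"]),
   ("product", ["product", "item", "package", "box", "received"])]

def generate_rule_based_description (top_words : List String) (topic_idx : Int) : List (String × String) :=
  let theme_scores : PySem.Dict String Int :=
    pvWordThemes.foldl (fun d p =>
      d.insert p.1 (top_words.foldl (fun s word => if p.2.contains word then s + 1 else s) (0 : Int)))
      PySem.Dict.empty
  -- max(theme_scores, key=theme_scores.get); theme_scores always has 6 keys, so max? is some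
  let main_theme := (PySem.List.max? theme_scores.keys (fun k => theme_scores.getD k 0)).getD ""
  [("name", pvTitle main_theme ++ " Discussion"),
   ("description", "Reviews discussing " ++ main_theme ++ " aspects of the product"),
   ("sentiment_theme", "Mixed")]

-- ===== PORT B =====
-- _WORD_TO_THEME = {w: t for t, ws in _WORD_THEMES.items() for w in ws}
def pvWordToTheme : PySem.Dict String String :=
  PySem.Dict.ofList (pvWordThemes.flatMap (fun p => p.2.map (fun w => (w, p.1))))

def generate_rule_based_description_alt (top_words : List String) (topic_idx : Int) : List (String × String) :=
  let init : PySem.Dict String Int := PySem.Dict.ofList (pvWordThemes.map (fun p => (p.1, 0)))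
  let theme_scores := top_words.foldl (fun d word =>
    match pvWordToTheme.get? word with
    | some theme => d.modify theme 0 (· + 1)
    | none => d) init
  let main_theme := (PySem.List.max? theme_scores.keys (fun k => theme_scores.getD k 0)).getD ""
  [("name", pvTitle main_theme ++ " Discussion"),
   ("description", "Reviews discussing " ++ main_theme ++ " aspects of the product"),
   ("sentiment_theme", "Mixed")]

-- ===== PRECONDITION & SPEC =====
def Spec_generate_rule_based_description (top_words : List String) (topic_idx : Int) (out : List (String × String)) : Prop := out = generate_rule_based_description_alt top_words topic_idx
instance (top_words : List String) (topic_idx : Int) (out : List (String × String)) : Decidable (Spec_generate_rule_based_description top_words topic_idx out) := by unfold Spec_generate_rule_based_description; infer_instance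

-- ===== CLAIM (what is proved, stated in full; the proofs are below) =====
def Claim_equal_generate_rule_based_description : Prop := ∀ (top_words : List String) (topic_idx : Int), Dom_generate_rule_based_description top_words topic_idx → Spec_generate_rule_based_description top_words topic_idx (generate_rule_based_description top_words topic_idx)

-- ===== LEMMAS AND PROOFS =====

-- the six-entry score dict with given values, in the shared insertion order of both ports
def pvMk6 (a b c d e f : Int) : PySem.Dict String Int :=
  PySem.Dict.mk [("quality", a), ("delivery", b), ("price", c),
                 ("design", d), ("service", e), ("product", f)]

-- a word belonging to none of the six theme lists has no theme
theorem pv_get?_none (w : String)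
    (h1 : w ∉ (["quality", "good", "excellent", "perfect", "great"] : List String))
    (h2 : w ∉ (["delivery", "shipping", "fast", "quick", "time"] : List String))
    (h3 : w ∉ (["price", "cheap", "expensive", "value", "money", "cost"] : List String))
    (h4 : w ∉ (["design", "look", "beautiful", "color", "style"] : List String))
    (h5 : w ∉ (["service", "support", "help", "staff", "customer"] : List String))
    (h6 : w ∉ (["product", "item", "package", "box", "received"] : List String)) :
    pvWordToTheme.get? w = none := by
  rw [show pvWordToTheme = PySem.Dict.mk [("quality", "quality"), ("good", "quality"), ("excellent", "quality"), ("perfect", "quality"), ("great", "quality"), ("delivery", "delivery"), ("shipping", "delivery"), ("fast", "delivery"), ("quick", "delivery"), ("time", "delivery"), ("price", "price"), ("cheap", "price"), ("expensive", "price"), ("value", "price"), ("money", "price"), ("cost", "price"), ("design", "design"), ("look", "design"), ("beautiful", "design"), ("color", "design"), ("style", "design"), ("service", "service"), ("support", "service"), ("help", "service"), ("staff", "service"), ("customer", "service"), ("product", "product"), ("item", "product"), ("package", "product"), ("box", "product"), ("received", "product")] from by decide]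
  rw [PySem.Dict.get?_eq_none_iff_contains]
  simp at h1 h2 h3 h4 h5 h6
  simp [PySem.Dict.contains]
  tauto

-- B's single pass adds, to each theme's score, the number of top words in that theme's list
set_option maxHeartbeats 1600000 in
theorem pv_fold_scores (ws : List String) (a b c d e f : Int) :
    ws.foldl (fun d word =>
      match pvWordToTheme.get? word with
      | some theme => d.modify theme 0 (· + 1)
      | none => d) (pvMk6 a b c d e f)
    = pvMk6 (a + ((ws.countP (fun w => (["quality", "good", "excellent", "perfect", "great"]).contains w) : Nat) : Int))
            (b + ((ws.countP (fun w => (["delivery", "shipping", "fast", "quick", "time"]).contains w) : Nat) : Int))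
            (c + ((ws.countP (fun w => (["price", "cheap", "expensive", "value", "money", "cost"]).contains w) : Nat) : Int))
            (d + ((ws.countP (fun w => (["design", "look", "beautiful", "color", "style"]).contains w) : Nat) : Int))
            (e + ((ws.countP (fun w => (["service", "support", "help", "staff", "customer"]).contains w) : Nat) : Int))
            (f + ((ws.countP (fun w => (["product", "item", "package", "box", "received"]).contains w) : Nat) : Int)) := by
  induction ws generalizing a b c d e f with
  | nil => simp [pvMk6]
  | cons w t ih =>
    simp only [List.foldl_cons]
    by_cases h1 : w ∈ (["quality", "good", "excellent", "perfect", "great"] : List String)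
    · fin_cases h1 <;>
        exact (ih (a + 1) b c d e f).trans (by simp [pvMk6]; omega)
    · by_cases h2 : w ∈ (["delivery", "shipping", "fast", "quick", "time"] : List String)
      · fin_cases h2 <;>
          exact (ih a (b + 1) c d e f).trans (by simp [pvMk6]; omega)
      · by_cases h3 : w ∈ (["price", "cheap", "expensive", "value", "money", "cost"] : List String)
        · fin_cases h3 <;>
            exact (ih a b (c + 1) d e f).trans (by simp [pvMk6]; omega)
        · by_cases h4 : w ∈ (["design", "look", "beautiful", "color", "style"] : List String)
          · fin_cases h4 <;>
              exact (ih a b c (d + 1) e f).trans (by simp [pvMk6]; omega)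
          · by_cases h5 : w ∈ (["service", "support", "help", "staff", "customer"] : List String)
            · fin_cases h5 <;>
                exact (ih a b c d (e + 1) f).trans (by simp [pvMk6]; omega)
            · by_cases h6 : w ∈ (["product", "item", "package", "box", "received"] : List String)
              · fin_cases h6 <;>
                  exact (ih a b c d e (f + 1)).trans (by simp [pvMk6]; omega)
              · have hn : pvWordToTheme.get? w = none := pv_get?_none w h1 h2 h3 h4 h5 h6
                simp only [hn]
                exact (ih a b c d e f).trans (by
                  simp at h1 h2 h3 h4 h5 h6
                  simp [pvMk6, List.countP_cons, List.contains_eq_mem]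
                  all_goals tauto)

-- A's six-scan score dict, computed by rfl on the literal theme table
theorem pv_scoresA (tw : List String) :
    pvWordThemes.foldl (fun d p =>
      d.insert p.1 (tw.foldl (fun s word => if p.2.contains word then s + 1 else s) (0 : Int)))
      PySem.Dict.empty
    = pvMk6 (tw.foldl (fun s word => if (["quality", "good", "excellent", "perfect", "great"] : List String).contains word then s + 1 else s) (0 : Int))
            (tw.foldl (fun s word => if (["delivery", "shipping", "fast", "quick", "time"] : List String).contains word then s + 1 else s) (0 : Int))
            (tw.foldl (fun s word => if (["price", "cheap", "expensive", "value", "money", "cost"] : List String).contains word then s + 1 else s) (0 : Int))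
            (tw.foldl (fun s word => if (["design", "look", "beautiful", "color", "style"] : List String).contains word then s + 1 else s) (0 : Int))
            (tw.foldl (fun s word => if (["service", "support", "help", "staff", "customer"] : List String).contains word then s + 1 else s) (0 : Int))
            (tw.foldl (fun s word => if (["product", "item", "package", "box", "received"] : List String).contains word then s + 1 else s) (0 : Int)) := rfl

-- ===== VERDICT (by name: the statement is the Claim_ definition above) =====
theorem generate_rule_based_description_spec : Claim_equal_generate_rule_based_description := by
  intro top_words topic_idx _
  unfold Spec_generate_rule_based_description
  simp only [generate_rule_based_description, generate_rule_based_description_alt]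
  rw [show PySem.Dict.ofList (pvWordThemes.map (fun p => (p.1, (0 : Int)))) = pvMk6 0 0 0 0 0 0
        from by decide]
  rw [pv_scoresA, pv_fold_scores]
  simp only [PySem.List.foldl_count_if]
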